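-- pv_equiv track=rewrite | github.com/murali317/DSA_Python | 2605-count-anagrams/count-anagrams.py | countAnagrams
-- ===== SOURCE A (Python) =====
-- def countAnagrams(s: str) -> int:
--     x = s.split(' ') # ['too', 'hot']
--     import math
--     vals2 = []
--     out = 1
--
--     def func(i):
--         hash = {}
--         for a in i:
--             hash[a] = hash.get(a, 0) + 1 # {'t':1, 'o':2}
--         return hash
--
--     def fact(i):
--         if i == 1 or i == 0:
--             return 1
--         # f = 1
--         # for m in range(1, i+1):
--         #     f *= m
--         return math.factorial(i)
--
--     for i in x:
--         # func(i) # {'t': 1, 'o': 2}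
--         vals = func(i).values() # [1,2]
--         cp = 1
--         for j in vals:
--             cp *= fact(j)
--         res = fact(len(i)) // cp
--         out *= res
--         out = out % (10**9 + 7)
--
--     return int(out)
-- ===== SOURCE B (Python) =====
-- import math
--
-- _MOD = 10**9 + 7
--
-- def countAnagrams(s: str) -> int:
--     # multinomial(word) as a product of binomial coefficients (no factorials,
--     # no big-integer division): keep a running total t over the distinct-char
--     # counts and multiply C(t, c), reducing mod 1e9+7 throughout.
--     out = 1
--     for w in s.split(' '):
--         t = 0
--         r = 1
--         for ch in dict.fromkeys(w):
--             c = w.count(ch)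
--             t += c
--             r = r * math.comb(t, c) % _MOD
--         out = out * r % _MOD
--     return out
-- ===== Notes on version B (the rewrite author's own statement) =====
-- stated objective: faster
-- what changed: Replaces per-word big-integer factorials and exact division with a running product of binomial coefficients C(t,c) over the distinct-char counts, reduced mod 1e9+7 at every step, so all arithmetic stays bounded by the modulus.
import Mathlib
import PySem

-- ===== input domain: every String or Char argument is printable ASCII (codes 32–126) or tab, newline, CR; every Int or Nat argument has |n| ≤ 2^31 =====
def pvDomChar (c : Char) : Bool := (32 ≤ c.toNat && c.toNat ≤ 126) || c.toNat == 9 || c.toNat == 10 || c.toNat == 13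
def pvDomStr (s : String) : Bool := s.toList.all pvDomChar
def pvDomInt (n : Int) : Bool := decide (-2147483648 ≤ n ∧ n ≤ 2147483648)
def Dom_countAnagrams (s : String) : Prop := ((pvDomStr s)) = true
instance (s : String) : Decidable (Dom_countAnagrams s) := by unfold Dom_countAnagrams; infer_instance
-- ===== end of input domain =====

-- B replaces A's per-word factorial/division multinomial by a running product of
-- binomial coefficients reduced mod 1e9+7 at every step (objective: alternative).

-- ===== PORT A =====
-- A's fact: math.factorial is exact here — every argument is a nonnegative count/length,
-- and on nonnegative integers math.factorial i = Nat.factorial i.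
def pyFact (i : Int) : Int :=
  if i == 1 || i == 0 then 1 else (Nat.factorial i.toNat : Int)

def countAnagrams (s : String) : Int :=
  let x := PySem.Chars.splitOn s.toList [' ']
  x.foldl (fun out i =>
    let vals := (i.foldl (fun d a => d.insert a (d.getD a 0 + 1)) PySem.Dict.empty).values
    let cp := vals.foldl (fun cp j => cp * pyFact j) 1
    let res := PySem.Int.floordiv (pyFact (i.length : Int)) cp
    PySem.Int.mod (out * res) (10 ^ 9 + 7)) 1

-- ===== PORT B =====
-- math.comb(t, c) on nonnegative arguments is Nat.choose.
def countAnagrams_alt (s : String) : Int :=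
  (PySem.Chars.splitOn s.toList [' ']).foldl (fun out w =>
    let r := (PySem.List.dedup w).foldl (fun (p : Int × Int) ch =>
        let c : Int := (w.count ch : Int)
        let t := p.1 + c
        (t, PySem.Int.mod (p.2 * (Nat.choose t.toNat c.toNat : Int)) (10 ^ 9 + 7)))
      (0, 1)
    PySem.Int.mod (out * r.2) (10 ^ 9 + 7)) 1

-- ===== PRECONDITION & SPEC =====
def Spec_countAnagrams (s : String) (out : Int) : Prop := out = countAnagrams_alt s
instance (s : String) (out : Int) : Decidable (Spec_countAnagrams s out) := by unfold Spec_countAnagrams; infer_instance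

-- ===== CLAIM (what is proved, stated in full; the proofs are below) =====
def Claim_equal_countAnagrams : Prop := ∀ (s : String), Dom_countAnagrams s → Spec_countAnagrams s (countAnagrams s)

-- ===== LEMMAS AND PROOFS =====

lemma pyFact_eq (i : Int) : pyFact i = (Nat.factorial i.toNat : Int) := by
  unfold pyFact
  split_ifs with h
  · simp only [Bool.or_eq_true, beq_iff_eq] at h
    rcases h with h | h <;> subst h <;> rfl
  · rfl

/-- product of the running binomials, on the Nat side -/
def prodChoose (t : Nat) : List Nat → Nat
  | [] => 1
  | c :: cs => Nat.choose (t + c) c * prodChoose (t + c) cs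

lemma prodChoose_spec (cs : List Nat) : ∀ t : Nat,
    prodChoose t cs * (cs.map Nat.factorial).prod * Nat.factorial t
      = Nat.factorial (t + cs.sum) := by
  induction cs with
  | nil => intro t; simp [prodChoose]
  | cons c cs ih =>
    intro t
    have h := ih (t + c)
    have hc : Nat.choose (t + c) c * Nat.factorial c * Nat.factorial t
        = Nat.factorial (t + c) := by
      have := Nat.choose_mul_factorial_mul_factorial (n := t + c) (k := c) (by omega)
      simpa [Nat.add_sub_cancel] using this
    calc prodChoose t (c :: cs) * ((c :: cs).map Nat.factorial).prod * Nat.factorial t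
        = prodChoose (t + c) cs * (cs.map Nat.factorial).prod *
            (Nat.choose (t + c) c * Nat.factorial c * Nat.factorial t) := by
          simp [prodChoose]; ring
      _ = prodChoose (t + c) cs * (cs.map Nat.factorial).prod * Nat.factorial (t + c) := by
          rw [hc]
      _ = Nat.factorial (t + c + cs.sum) := h
      _ = Nat.factorial (t + (c :: cs).sum) := by simp [Nat.add_assoc]

lemma sum_counts (ks : List Char) : ∀ w : List Char, ks.Nodup → (∀ x ∈ w, x ∈ ks) →
    (ks.map (fun k => w.count k)).sum = w.length := by
  induction ks with
  | nil =>
    intro w _ hall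
    have : w = [] := by
      cases w with
      | nil => rfl
      | cons a t => exact absurd (hall a (by simp)) (by simp)
    simp [this]
  | cons k ks ih =>
    intro w hnd hall
    have hks : ∀ x ∈ w.filter (fun c => !(c == k)), x ∈ ks := by
      intro x hx
      have hxk : x ≠ k := by simpa using List.of_mem_filter hx
      rcases List.mem_cons.mp (hall x (List.mem_of_mem_filter hx)) with h | h
      · exact absurd h hxk
      · exact h
    have ihw := ih (w.filter (fun c => !(c == k))) hnd.of_cons hks
    have hmap : ks.map (fun k' => (w.filter (fun c => !(c == k))).count k')
        = ks.map (fun k' => w.count k') := by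
      apply List.map_congr_left
      intro k' hk'
      have hne : k' ≠ k := by
        rintro rfl; exact (List.nodup_cons.mp hnd).1 hk'
      simp [List.count_filter, hne]
    have hlen : w.count k + (w.filter (fun c => !(c == k))).length = w.length := by
      have h := List.length_eq_length_filter_add (l := w) (fun c => c == k)
      rw [List.count, List.countP_eq_length_filter]
      omega
    calc ((k :: ks).map (fun k' => w.count k')).sum
        = w.count k + (ks.map (fun k' => w.count k')).sum := by simp
      _ = w.count k + (ks.map (fun k' => (w.filter (fun c => !(c == k))).count k')).sum := by
          rw [hmap]
      _ = w.count k + (w.filter (fun c => !(c == k))).length := by rw [ihw]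
      _ = w.length := hlen

/-- B's inner fold computes the running-binomial product mod M. -/
lemma b_inner (w : List Char) (M : Int) (hM : 0 < M) (ks : List Char) :
    ∀ (t0 : Nat) (r0 : Int), PySem.Int.mod r0 M = r0 →
    (ks.foldl (fun (p : Int × Int) ch =>
        (p.1 + ((w.count ch : Nat) : Int),
         PySem.Int.mod (p.2 * (Nat.choose (p.1 + ((w.count ch : Nat) : Int)).toNat (w.count ch) : Int)) M))
      ((t0 : Int), r0)).2
    = PySem.Int.mod (r0 * (prodChoose t0 (ks.map (fun k => w.count k)) : Int)) M := by
  induction ks with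
  | nil =>
    intro t0 r0 hr
    simpa [prodChoose] using hr.symm
  | cons k ks ih =>
    intro t0 r0 hr
    have hcast : ((t0 : Int) + ((w.count k : Nat) : Int)) = ((t0 + w.count k : Nat) : Int) := by
      push_cast; ring
    simp only [List.foldl_cons]
    rw [hcast, Int.toNat_natCast]
    have hr' : PySem.Int.mod (PySem.Int.mod (r0 * (Nat.choose (t0 + w.count k) (w.count k) : Int)) M) M
        = PySem.Int.mod (r0 * (Nat.choose (t0 + w.count k) (w.count k) : Int)) M := by
      simp only [PySem.Int.mod_eq_emod_of_pos hM]
      exact Int.emod_emod_of_dvd _ (dvd_refl M)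
    rw [ih (t0 + w.count k) _ hr']
    simp only [List.map_cons, prodChoose, PySem.Int.mod_eq_emod_of_pos hM]
    conv_lhs => rw [Int.mul_emod, Int.emod_emod_of_dvd _ (dvd_refl M)]
    rw [← Int.mul_emod]
    congr 1
    push_cast
    ring

/-- A's cp is the product of factorials of the counts, as a Nat. -/
lemma a_cp (w : List Char) (ks : List Char) : ∀ r0 : Nat,
    ((ks.map (fun k => ((w.count k : Nat) : Int))).foldl (fun cp j => cp * pyFact j) (r0 : Int))
      = ((r0 * ((ks.map (fun k => w.count k)).map Nat.factorial).prod : Nat) : Int) := by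
  induction ks with
  | nil => intro r0; simp
  | cons k ks ih =>
    intro r0
    simp only [List.map_cons, List.foldl_cons]
    rw [show ((r0 : Int) * pyFact ((w.count k : Nat) : Int))
        = ((r0 * Nat.factorial (w.count k) : Nat) : Int) by
      rw [pyFact_eq, Int.toNat_natCast]; push_cast; ring]
    rw [ih]
    push_cast [List.prod_cons]
    ring

/-- the per-word step functions of A and of B agree -/
lemma per_word (w : List Char) (out : Int) :
    (fun out i =>
      let vals := (i.foldl (fun d a => d.insert a (d.getD a 0 + 1)) PySem.Dict.empty).values
      let cp := vals.foldl (fun cp j => cp * pyFact j) 1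
      let res := PySem.Int.floordiv (pyFact (i.length : Int)) cp
      PySem.Int.mod (out * res) (10 ^ 9 + 7)) out w
    = (fun out w =>
      let r := (PySem.List.dedup w).foldl (fun (p : Int × Int) ch =>
          let c : Int := (w.count ch : Int)
          let t := p.1 + c
          (t, PySem.Int.mod (p.2 * (Nat.choose t.toNat c.toNat : Int)) (10 ^ 9 + 7)))
        (0, 1)
      PySem.Int.mod (out * r.2) (10 ^ 9 + 7)) out w := by
  have hM : (0 : Int) < 10 ^ 9 + 7 := by norm_num
  simp only [Int.toNat_natCast]
  set ks := PySem.Set.ofList w with hks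
  have hvals : (w.foldl (fun d a => d.insert a (d.getD a 0 + 1)) PySem.Dict.empty).values
      = ks.map (fun k => ((w.count k : Nat) : Int)) := by
    rw [PySem.Dict.foldl_insert_getD_add_one_eq_counter]
    show (PySem.Dict.counter w).items.map (·.2) = _
    rw [PySem.Dict.items_counter]
    simp [hks]
  rw [hvals]
  have hA := a_cp w ks 1
  rw [Nat.cast_one] at hA
  rw [hA]
  rw [PySem.List.dedup_eq_ofList, ← hks]
  rw [show ((0 : Int), (1 : Int)) = (((0 : Nat) : Int), (1 : Int)) by norm_num]
  rw [b_inner w _ hM ks 0 1 (by decide)]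
  set cs : List Nat := ks.map (fun k => w.count k) with hcs
  have hsum : cs.sum = w.length := by
    rw [hcs]
    exact sum_counts ks w (PySem.Set.nodup_ofList w) (fun x hx => by
      rw [hks]; exact (PySem.Set.mem_ofList w x).2 hx)
  have hfac : prodChoose 0 cs * (cs.map Nat.factorial).prod = Nat.factorial w.length := by
    have h := prodChoose_spec cs 0
    simpa [hsum] using h
  have hres : PySem.Int.floordiv (pyFact (w.length : Int))
      ((1 * (cs.map Nat.factorial).prod : Nat) : Int) = ((prodChoose 0 cs : Nat) : Int) := by
    rw [pyFact_eq, Int.toNat_natCast, one_mul]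
    rw [PySem.Int.floordiv_natCast]
    congr 1
    rw [← hfac]
    exact Nat.mul_div_cancel _ (List.prod_pos (by
      intro x hx
      rcases List.mem_map.mp hx with ⟨c, _, rfl⟩
      exact Nat.factorial_pos c))
  rw [hres]
  simp only [PySem.Int.mod_eq_emod_of_pos hM]
  conv_rhs => rw [Int.mul_emod, Int.emod_emod_of_dvd _ (dvd_refl _), ← Int.mul_emod]
  rw [one_mul]

-- ===== VERDICT (by name: the statement is the Claim_ definition above) =====
theorem countAnagrams_spec : Claim_equal_countAnagrams := by
  intro s _
  unfold Spec_countAnagrams countAnagrams countAnagrams_alt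
  simp only []
  apply PySem.List.foldl_congr_mem
  intro out w _
  exact per_word w out
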